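-- pv_equiv track=rewrite | github.com/vamseeachanta/workspace-hub | scripts/data/doc_intelligence/fetch_queue_manager.py | get_domain_stats
-- ===== SOURCE A (Python) =====
-- def get_domain_stats(queue: dict) -> dict[str, dict[str, int]]:
--     """Return per-domain counts of {pending, completed, failed}."""
--     stats: dict[str, dict[str, int]] = {}
--     for doc in queue.get("documents", []):
--         domain = doc.get("domain", "")
--         status = doc.get("status", "pending")
--         if domain not in stats:
--             stats[domain] = {"pending": 0, "completed": 0, "failed": 0}
--         if status in stats[domain]:
--             stats[domain][status] += 1
--     return stats
-- ===== SOURCE B (Python) =====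
-- def get_domain_stats(queue: dict) -> dict[str, dict[str, int]]:
--     """Return per-domain counts of {pending, completed, failed}."""
--     # Declarative: extract (domain, status) pairs, list first-seen distinct
--     # domains, and count each valid status per domain directly.
--     pairs = [(doc.get("domain", ""), doc.get("status", "pending"))
--              for doc in queue.get("documents", [])]
--     domains = list(dict.fromkeys(d for d, _ in pairs))
--     return {d: {st: pairs.count((d, st))
--                 for st in ("pending", "completed", "failed")}
--             for d in domains}
-- ===== Notes on version B (the rewrite author's own statement) =====
-- stated objective: simpler
-- what changed: Replaces A's per-document mutation of a nested stats dict by a declarative pipeline: extract the (domain, status) pairs, list the first-seen distinct domains, and build each domain's row by counting the pairs list for each of the three valid statuses.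
import Mathlib
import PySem

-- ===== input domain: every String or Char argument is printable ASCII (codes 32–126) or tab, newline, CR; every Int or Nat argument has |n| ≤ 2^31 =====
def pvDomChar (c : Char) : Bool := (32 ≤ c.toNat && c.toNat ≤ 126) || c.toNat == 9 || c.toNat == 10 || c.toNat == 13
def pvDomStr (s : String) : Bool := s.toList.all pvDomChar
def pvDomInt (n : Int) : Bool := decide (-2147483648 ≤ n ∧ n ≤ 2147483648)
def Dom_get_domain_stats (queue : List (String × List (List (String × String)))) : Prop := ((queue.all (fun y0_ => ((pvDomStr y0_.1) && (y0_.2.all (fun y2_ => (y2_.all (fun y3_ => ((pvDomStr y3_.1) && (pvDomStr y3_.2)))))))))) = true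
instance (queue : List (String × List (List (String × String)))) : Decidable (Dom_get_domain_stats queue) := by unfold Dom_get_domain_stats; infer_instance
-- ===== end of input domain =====

-- B replaces A's per-document nested-dict mutation by a declarative pipeline: collect
-- (domain, status) pairs, list first-seen distinct domains, count each valid status
-- per domain with list.count (objective: simpler).


-- ===== PORT A =====
-- literal port of A; `stats[domain]` in the guard is rendered as getD with an empty
-- default — exact, since the guard is only reached after `domain` is in `stats`.
def get_domain_stats (queue : List (String × List (List (String × String)))) : List (String × List (String × Int)) :=
  let stats : PySem.Dict String (PySem.Dict String Int) :=
    ((PySem.Dict.mk queue).getD "documents" []).foldl (fun stats doc =>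
      let domain := (PySem.Dict.mk doc).getD "domain" ""
      let status := (PySem.Dict.mk doc).getD "status" "pending"
      let stats :=
        if stats.contains domain then stats
        else stats.insert domain (PySem.Dict.ofList [("pending", 0), ("completed", 0), ("failed", 0)])
      if (stats.getD domain PySem.Dict.empty).contains status then
        stats.modify domain PySem.Dict.empty (fun inn => inn.modify status 0 (· + 1))
      else stats) PySem.Dict.empty
  stats.items.map (fun p => (p.1, p.2.items))

-- ===== PORT B =====
-- `dict.fromkeys` (first-seen distinct keys) is ported as PySem.Set.ofList;
-- `pairs.count` as List.count.
def get_domain_stats_alt (queue : List (String × List (List (String × String)))) : List (String × List (String × Int)) :=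
  let pairs : List (String × String) :=
    ((PySem.Dict.mk queue).getD "documents" []).map (fun doc =>
      ((PySem.Dict.mk doc).getD "domain" "", (PySem.Dict.mk doc).getD "status" "pending"))
  let domains : List String := PySem.Set.ofList (pairs.map (·.1))
  domains.map (fun d =>
    (d, [("pending", (pairs.count (d, "pending") : Int)),
         ("completed", (pairs.count (d, "completed") : Int)),
         ("failed", (pairs.count (d, "failed") : Int))]))

-- ===== PRECONDITION & SPEC =====
def Spec_get_domain_stats (queue : List (String × List (List (String × String)))) (out : List (String × List (String × Int))) : Prop := out = get_domain_stats_alt queue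
instance (queue : List (String × List (List (String × String)))) (out : List (String × List (String × Int))) : Decidable (Spec_get_domain_stats queue out) := by unfold Spec_get_domain_stats; infer_instance

-- ===== CLAIM (what is proved, stated in full; the proofs are below) =====
def Claim_equal_get_domain_stats : Prop := ∀ (queue : List (String × List (List (String × String)))), Dom_get_domain_stats queue → Spec_get_domain_stats queue (get_domain_stats queue)

-- ===== LEMMAS AND PROOFS =====

-- the A-side merge step, over a weighted (domain, status) entry
def pvStep (stats : PySem.Dict String (PySem.Dict String Int)) (e : (String × String) × Int) :
    PySem.Dict String (PySem.Dict String Int) :=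
  let stats :=
    if stats.contains e.1.1 then stats
    else stats.insert e.1.1 (PySem.Dict.ofList [("pending", 0), ("completed", 0), ("failed", 0)])
  if (stats.getD e.1.1 PySem.Dict.empty).contains e.1.2 then
    stats.modify e.1.1 PySem.Dict.empty (fun inn => inn.modify e.1.2 0 (· + e.2))
  else stats

def pvMkInner (a b c : Int) : PySem.Dict String Int :=
  PySem.Dict.mk [("pending", a), ("completed", b), ("failed", c)]

def pvCnt (l : List ((String × String) × Int)) (d st : String) : Int :=
  ((l.filter (fun e => e.1 == (d, st))).map (·.2)).sum

def pvF (l : List ((String × String) × Int)) (d : String) : String × PySem.Dict String Int :=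
  (d, pvMkInner (pvCnt l d "pending") (pvCnt l d "completed") (pvCnt l d "failed"))

def pvBuild (l : List ((String × String) × Int)) : PySem.Dict String (PySem.Dict String Int) :=
  PySem.Dict.mk ((PySem.Set.ofList (l.map (·.1.1))).map (pvF l))

theorem pv_zero_inner :
    PySem.Dict.ofList [("pending", (0:Int)), ("completed", 0), ("failed", 0)] = pvMkInner 0 0 0 := by
  decide

theorem pv_bump_pending (a b c n : Int) :
    (pvMkInner a b c).modify "pending" 0 (· + n) = pvMkInner (a + n) b c := by
  simp [pvMkInner, PySem.Dict.modify, PySem.Dict.insert, PySem.Dict.getD, PySem.Dict.get?]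

theorem pv_bump_completed (a b c n : Int) :
    (pvMkInner a b c).modify "completed" 0 (· + n) = pvMkInner a (b + n) c := by
  simp [pvMkInner, PySem.Dict.modify, PySem.Dict.insert, PySem.Dict.getD, PySem.Dict.get?]

theorem pv_bump_failed (a b c n : Int) :
    (pvMkInner a b c).modify "failed" 0 (· + n) = pvMkInner a b (c + n) := by
  simp [pvMkInner, PySem.Dict.modify, PySem.Dict.insert, PySem.Dict.getD, PySem.Dict.get?]

theorem pv_contains_inner (a b c : Int) (σ : String) :
    (pvMkInner a b c).contains σ = ("pending" == σ || "completed" == σ || "failed" == σ) := by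
  simp [pvMkInner, PySem.Dict.contains_mk, List.any, Bool.or_assoc]

theorem pv_cnt_append (l : List ((String × String) × Int)) (e : (String × String) × Int)
    (d st : String) :
    pvCnt (l ++ [e]) d st = pvCnt l d st + (if e.1 == (d, st) then e.2 else 0) := by
  simp only [pvCnt, List.filter_append, List.filter_cons, List.filter_nil, List.map_append,
    List.sum_append]
  split <;> simp

theorem pv_cnt_of_not_mem (l : List ((String × String) × Int)) (d st : String)
    (h : d ∉ l.map (·.1.1)) : pvCnt l d st = 0 := by
  have : l.filter (fun e => e.1 == (d, st)) = [] := by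
    rw [List.filter_eq_nil_iff]
    intro e he hbe
    exact h (List.mem_map.mpr ⟨e, he, by simpa using congrArg Prod.fst (eq_of_beq hbe)⟩)
  simp [pvCnt, this]

theorem pv_keys_build (l : List ((String × String) × Int)) :
    (pvBuild l).keys = (PySem.Set.ofList (l.map (·.1.1)) : List String) := by
  simp [pvBuild, PySem.Dict.keys_mk, List.map_map, Function.comp_def, pvF]

theorem pv_F_ne (l : List ((String × String) × Int)) (δ σ d : String) (n : Int)
    (h : d ≠ δ) : pvF (l ++ [((δ, σ), n)]) d = pvF l d := by
  simp [pvF, pv_cnt_append, Ne.symm h]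

theorem pv_F_invalid (l : List ((String × String) × Int)) (δ σ : String) (n : Int)
    (hσ : ¬("pending" == σ || "completed" == σ || "failed" == σ) = true) (d : String) :
    pvF (l ++ [((δ, σ), n)]) d = pvF l d := by
  simp only [Bool.or_eq_true, beq_iff_eq, not_or] at hσ
  obtain ⟨⟨h1, h2⟩, h3⟩ := hσ
  simp [pvF, pv_cnt_append, Ne.symm h1, Ne.symm h2, Ne.symm h3]

theorem pv_F_self (l : List ((String × String) × Int)) (δ σ : String) (n : Int)
    (hσ : ("pending" == σ || "completed" == σ || "failed" == σ) = true) :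
    pvF (l ++ [((δ, σ), n)]) δ = (δ, (pvF l δ).2.modify σ 0 (· + n)) := by
  simp only [Bool.or_eq_true, beq_iff_eq] at hσ
  rcases hσ with (h | h) | h <;> subst h <;>
    simp [pvF, pv_cnt_append, pv_bump_pending, pv_bump_completed, pv_bump_failed]

theorem pv_step_build (l : List ((String × String) × Int)) (δ σ : String) (n : Int) :
    pvStep (pvBuild l) ((δ, σ), n) = pvBuild (l ++ [((δ, σ), n)]) := by
  have hnd : (PySem.Set.ofList (l.map (·.1.1)) : List String).Nodup := PySem.Set.nodup_ofList _
  have hkeys := pv_keys_build l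
  have hdoms : (l ++ [((δ, σ), n)]).map (·.1.1) = l.map (·.1.1) ++ [δ] := by simp
  have hcontains : (pvBuild l).contains δ
      = decide (δ ∈ (PySem.Set.ofList (l.map (·.1.1)) : List String)) := by
    rw [PySem.Dict.contains_eq_decide_mem_keys, hkeys]
  by_cases hδ : δ ∈ (PySem.Set.ofList (l.map (·.1.1)) : List String)
  · -- domain already present
    have hmem : (δ, (pvF l δ).2) ∈ (pvBuild l).items :=
      List.mem_map.mpr ⟨δ, hδ, rfl⟩
    have hget : (pvBuild l).getD δ PySem.Dict.empty = (pvF l δ).2 :=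
      PySem.Dict.getD_of_mem_items _ hmem (hkeys ▸ hnd) _
    have hadd : PySem.Set.ofList ((l ++ [((δ, σ), n)]).map (·.1.1))
        = PySem.Set.ofList (l.map (·.1.1)) := by
      rw [hdoms, PySem.Set.ofList_append_singleton, PySem.Set.add_eq_ite, if_pos hδ]
    simp only [pvStep, hcontains, decide_eq_true hδ, if_true, hget]
    by_cases hσ : ("pending" == σ || "completed" == σ || "failed" == σ) = true
    · rw [if_pos (by simp only [pvF]; rw [pv_contains_inner]; exact hσ)]
      rw [show ((pvBuild l).modify δ PySem.Dict.empty fun inn => inn.modify σ 0 fun x => x + n)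
          = (pvBuild l).insert δ (((pvBuild l).getD δ PySem.Dict.empty).modify σ 0 fun x => x + n)
          from rfl, hget]
      apply PySem.Dict.ext
      rw [PySem.Dict.items_insert_of_contains _ _ (by rw [hcontains]; exact decide_eq_true hδ)]
      simp only [pvBuild, List.map_map]
      rw [hadd]
      apply List.map_congr_left
      intro d _
      by_cases hd : d = δ
      · subst hd
        simp only [Function.comp_apply, pvF, BEq.rfl, if_pos]
        exact (pv_F_self l d σ n hσ).symm
      · have : ((pvF l d).1 == δ) = false := by simpa [pvF] using hd
        simp only [Function.comp_apply, this, Bool.false_eq_true, if_false]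
        exact (pv_F_ne l δ σ d n hd).symm
    · rw [if_neg (by simp only [pvF]; rw [pv_contains_inner]; exact hσ)]
      show pvBuild l = pvBuild (l ++ [((δ, σ), n)])
      unfold pvBuild
      rw [hadd]
      exact congrArg _ (List.map_congr_left fun d _ => (pv_F_invalid l δ σ n hσ d).symm)
  · -- new domain
    have hc0 : (pvBuild l).contains δ = false := by
      rw [hcontains]; exact decide_eq_false hδ
    have hadd : (PySem.Set.ofList ((l ++ [((δ, σ), n)]).map (·.1.1)) : List String)
        = (PySem.Set.ofList (l.map (·.1.1)) : List String) ++ [δ] := by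
      rw [hdoms, PySem.Set.ofList_append_singleton, PySem.Set.add_eq_ite, if_neg hδ]
    have hδl : δ ∉ l.map (·.1.1) := fun h => hδ ((PySem.Set.mem_ofList _ _).mpr h)
    have hzero : pvF l δ = (δ, pvMkInner 0 0 0) := by
      simp [pvF, pv_cnt_of_not_mem l δ _ hδl]
    have hins : (pvBuild l).insert δ (PySem.Dict.ofList [("pending", 0), ("completed", 0), ("failed", 0)])
        = PySem.Dict.mk (((PySem.Set.ofList (l.map (·.1.1)) : List String)).map (pvF l) ++ [(δ, pvMkInner 0 0 0)]) := by
      apply PySem.Dict.ext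
      rw [PySem.Dict.items_insert_of_not_contains _ _ hc0, pv_zero_inner]
      rfl
    simp only [pvStep, hc0, Bool.false_eq_true, if_false, hins]
    have hgets : (PySem.Dict.mk (((PySem.Set.ofList (l.map (·.1.1)) : List String)).map (pvF l)
        ++ [(δ, pvMkInner 0 0 0)])).getD δ PySem.Dict.empty = pvMkInner 0 0 0 := by
      apply PySem.Dict.getD_of_mem_items
      · exact List.mem_append.mpr (Or.inr (List.mem_singleton.mpr rfl))
      · show ((((PySem.Set.ofList (l.map (·.1.1)) : List String)).map (pvF l)
          ++ [(δ, pvMkInner 0 0 0)]).map (·.1)).Nodup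
        rw [List.map_append, List.map_map]
        have : ((PySem.Set.ofList (l.map (·.1.1)) : List String)).map ((·.1) ∘ pvF l)
            = (PySem.Set.ofList (l.map (·.1.1)) : List String) := by
          simp [pvF, Function.comp_def]
        rw [this]
        exact List.nodup_append.mpr ⟨hnd, List.nodup_singleton _,
          by intro a ha b hb h; simp at hb; exact hδ ((h.trans hb) ▸ ha)⟩
    rw [hgets]
    by_cases hσ : ("pending" == σ || "completed" == σ || "failed" == σ) = true
    · rw [if_pos (by rw [pv_contains_inner]; exact hσ)]
      rw [show ((PySem.Dict.mk (((PySem.Set.ofList (l.map (·.1.1)) : List String)).map (pvF l)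
            ++ [(δ, pvMkInner 0 0 0)])).modify δ PySem.Dict.empty
            fun inn => inn.modify σ 0 fun x => x + n)
          = (PySem.Dict.mk (((PySem.Set.ofList (l.map (·.1.1)) : List String)).map (pvF l)
            ++ [(δ, pvMkInner 0 0 0)])).insert δ
            (((PySem.Dict.mk (((PySem.Set.ofList (l.map (·.1.1)) : List String)).map (pvF l)
            ++ [(δ, pvMkInner 0 0 0)])).getD δ PySem.Dict.empty).modify σ 0 fun x => x + n)
          from rfl, hgets]
      apply PySem.Dict.ext
      rw [PySem.Dict.items_insert_of_contains _ _ (by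
        rw [PySem.Dict.contains_mk]
        exact List.any_eq_true.mpr ⟨(δ, pvMkInner 0 0 0),
          List.mem_append.mpr (Or.inr (List.mem_singleton.mpr rfl)), BEq.rfl⟩)]
      simp only [pvBuild]
      rw [hadd, List.map_append, List.map_append]
      congr 1
      · rw [List.map_map]
        apply List.map_congr_left
        intro d hd
        have hdδ : d ≠ δ := fun h => hδ (h ▸ hd)
        have : ((pvF l d).1 == δ) = false := by simpa [pvF] using hdδ
        simp only [Function.comp_apply, this, Bool.false_eq_true, if_false]
        exact (pv_F_ne l δ σ d n hdδ).symm
      · simp [pv_F_self l δ σ n hσ, hzero]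
    · rw [if_neg (by rw [pv_contains_inner]; exact hσ)]
      apply PySem.Dict.ext
      simp only [pvBuild]
      rw [hadd, List.map_append]
      congr 1
      · apply List.map_congr_left
        intro d _
        exact (pv_F_invalid l δ σ n hσ d).symm
      · show [(δ, pvMkInner 0 0 0)] = [pvF (l ++ [((δ, σ), n)]) δ]
        rw [pv_F_invalid l δ σ n hσ δ, hzero]

theorem pv_fold_eq_build (l : List ((String × String) × Int)) :
    l.foldl pvStep PySem.Dict.empty = pvBuild l := by
  induction l using List.reverseRecOn with
  | nil => rfl
  | append_singleton l e ih =>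
    obtain ⟨⟨δ, σ⟩, n⟩ := e
    rw [List.foldl_append, List.foldl_cons, List.foldl_nil, ih, pv_step_build]

theorem pv_cnt_map_one (l0 : List (String × String)) (d st : String) :
    pvCnt (l0.map (fun p => (p, 1))) d st = (l0.count (d, st) : Int) := by
  induction l0 with
  | nil => rfl
  | cons a t ih =>
    simp only [List.map_cons, pvCnt, List.filter_cons] at ih ⊢
    by_cases h : (a == (d, st)) = true <;>
      simp [h, List.count_cons, eq_of_beq, ih]
    omega

-- ===== VERDICT (by name: the statement is the Claim_ definition above) =====
theorem get_domain_stats_spec : Claim_equal_get_domain_stats := by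
  intro queue _
  show get_domain_stats queue = get_domain_stats_alt queue
  unfold get_domain_stats get_domain_stats_alt
  generalize (PySem.Dict.mk queue).getD "documents" [] = docs
  have hA : (docs.foldl (fun stats doc =>
      let domain := (PySem.Dict.mk doc).getD "domain" ""
      let status := (PySem.Dict.mk doc).getD "status" "pending"
      let stats :=
        if stats.contains domain then stats
        else stats.insert domain (PySem.Dict.ofList [("pending", 0), ("completed", 0), ("failed", 0)])
      if (stats.getD domain PySem.Dict.empty).contains status then
        stats.modify domain PySem.Dict.empty (fun inn => inn.modify status 0 (· + 1))
      else stats) PySem.Dict.empty)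
      = ((docs.map (fun doc => (((PySem.Dict.mk doc).getD "domain" "", (PySem.Dict.mk doc).getD "status" "pending"), (1 : Int)))).foldl pvStep PySem.Dict.empty) := by
    rw [List.foldl_map]; rfl
  rw [hA, pv_fold_eq_build]
  generalize hp : docs.map (fun doc => ((PySem.Dict.mk doc).getD "domain" "", (PySem.Dict.mk doc).getD "status" "pending")) = pairs
  have hl : docs.map (fun doc => (((PySem.Dict.mk doc).getD "domain" "", (PySem.Dict.mk doc).getD "status" "pending"), (1 : Int)))
      = pairs.map (fun p => (p, 1)) := by rw [← hp]; simp [List.map_map]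
  rw [hl]
  have hdom : (pairs.map (fun p => (p, (1:Int)))).map (·.1.1) = pairs.map (·.1) := by
    simp [List.map_map, Function.comp_def]
  simp only [pvBuild, hdom, List.map_map]
  apply List.map_congr_left
  intro d _
  simp [Function.comp_apply, pvF, pvMkInner, pv_cnt_map_one]
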